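-- pv_equiv track=rewrite | github.com/meirdev/adventofcode-2023 | day15/main.py | part2
-- ===== SOURCE A (Python) =====
-- import collections
-- import functools
--
-- def parse_input(input: str) -> list[str]:
--     return input.strip().split(",")
--
-- def hash(value: str) -> int:
--     return functools.reduce(
--         lambda current, char: (current + ord(char)) * 17 % 256, value, 0
--     )
--
-- def part2(input: str) -> int:
--     seq = parse_input(input)
--
--     boxes = collections.defaultdict(dict)
--
--     for i in seq:
--         if i[-1] == "-":
--             v = i[:-1]
--             boxes[hash(v)].pop(v, None)
--         else:
--             v = i[:-2]
--             boxes[hash(v)][v] = int(i[-1])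
--
--     return sum(
--         (box + 1) * slot * focal_length
--         for box in boxes
--         for slot, focal_length in enumerate(boxes[box].values(), start=1)
--     )
-- ===== SOURCE B (Python) =====
-- import collections
--
--
-- def hash(value: str) -> int:
--     h = 0
--     for char in value:
--         h = (h + ord(char)) * 17 % 256
--     return h
--
--
-- def part2(input: str) -> int:
--     seq = input.strip().split(",")
--
--     # Pass 1: count the '-' instructions still ahead for each label.
--     pending = collections.Counter(ins[:-1] for ins in seq if ins[-1] == "-")
--
--     # Pass 2: a '=' takes effect only if no '-' for its label lies ahead;
--     # the first effective '=' fixes the label's slot order, the last one its focal length.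
--     order = []
--     focal = {}
--     for ins in seq:
--         if ins[-1] == "-":
--             pending[ins[:-1]] -= 1
--         else:
--             label = ins[:-2]
--             if pending[label] == 0:
--                 if label not in focal:
--                     order.append(label)
--                 focal[label] = int(ins[-1])
--
--     # Pass 3: slots per box follow the global effective-insertion order.
--     total = 0
--     slots = {}
--     for label in order:
--         b = hash(label)
--         slot = slots.get(b, 0) + 1
--         slots[b] = slot
--         total += (b + 1) * slot * focal[label]
--     return total
-- ===== Notes on version B (the rewrite author's own statement) =====
-- stated objective: alternative
-- what changed: B never simulates the boxes: instead of A's defaultdict-of-dicts mutated per instruction, B makes three offline passes - a Counter of '-' instructions still ahead per label, a pass keeping only '=' instructions with no later '-' for their label (first such '=' fixes slot order, last fixes focal length), and a final pass assigning slots per box from the global effective-insertion order.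
import Mathlib
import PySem

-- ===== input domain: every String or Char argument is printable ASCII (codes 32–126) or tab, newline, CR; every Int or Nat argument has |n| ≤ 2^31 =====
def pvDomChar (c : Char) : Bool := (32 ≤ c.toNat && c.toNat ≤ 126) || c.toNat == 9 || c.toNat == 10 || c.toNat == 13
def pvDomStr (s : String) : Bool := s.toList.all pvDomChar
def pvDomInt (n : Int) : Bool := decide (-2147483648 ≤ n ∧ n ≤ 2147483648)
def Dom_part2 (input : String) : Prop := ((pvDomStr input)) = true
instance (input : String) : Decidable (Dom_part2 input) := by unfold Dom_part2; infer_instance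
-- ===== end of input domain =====

-- B never simulates the boxes: instead of A's defaultdict-of-dicts mutated per instruction,
-- B makes three offline passes (count '-' instructions ahead per label; keep only '=' instructions
-- with no later '-' for their label; assign slots per box from the global effective-insertion order).
-- Equivalence of the RETURN value is proved on Pre_ (inputs where the Python A raises no exception).

-- ===== PORT A =====
-- parse_input(input) = input.strip().split(",")
def parse_input (input : String) : List (List Char) :=
  PySem.Chars.splitOn (PySem.Chars.strip input.toList) [',']

-- hash(value) = reduce(lambda current, char: (current + ord(char)) * 17 % 256, value, 0)
def pyhash (value : List Char) : Int :=
  value.foldl (fun current char => PySem.Int.mod ((current + (char.toNat : Int)) * 17) 256) 0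

-- body of A's `for i in seq` loop (defaultdict: getD with empty-dict default, then reinsert)
def part2_step (boxes : PySem.Dict Int (PySem.Dict (List Char) Int)) (i : List Char) :
    PySem.Dict Int (PySem.Dict (List Char) Int) :=
  match PySem.List.pyGet? i (-1) with
  | none => boxes   -- empty token: indexing its last character raises IndexError in Python; excluded by Pre_part2
  | some c =>
    if c = '-' then
      let v := PySem.List.slice i none (some (-1))
      boxes.insert (pyhash v) ((boxes.getD (pyhash v) PySem.Dict.empty).erase v)
    else
      match PySem.Int.ofChars? [c] with
      | none => boxes   -- non-digit last character: int raises ValueError; excluded by Pre_part2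
      | some n =>
        let v := PySem.List.slice i none (some (-2))
        boxes.insert (pyhash v) ((boxes.getD (pyhash v) PySem.Dict.empty).insert v n)

def part2 (input : String) : Int :=
  let boxes := (parse_input input).foldl part2_step PySem.Dict.empty
  (boxes.items.map (fun p =>
    ((PySem.List.enumerate p.2.values 1).map (fun q => (p.1 + 1) * q.1 * q.2)).sum)).sum

-- ===== PORT B =====
-- B's hand-written hash loop
def hashB (value : List Char) : Nat :=
  value.foldl (fun h char => (h + char.toNat) * 17 % 256) 0

-- pending = collections.Counter(ins[:-1] for ins in seq if ins[-1] == "-")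
def part2B_pending (seq : List (List Char)) : PySem.Dict (List Char) Int :=
  PySem.Dict.counter
    ((seq.filter (fun ins => PySem.List.pyGet? ins (-1) == some '-')).map
      (fun ins => PySem.List.slice ins none (some (-1))))

-- body of B's pass-2 loop; state = (pending, order, focal)
def part2B_step
    (st : PySem.Dict (List Char) Int × List (List Char) × PySem.Dict (List Char) Int)
    (ins : List Char) :
    PySem.Dict (List Char) Int × List (List Char) × PySem.Dict (List Char) Int :=
  match PySem.List.pyGet? ins (-1) with
  | none => st      -- empty token: Python raises IndexError; excluded by Pre_part2
  | some c =>
    if c = '-' then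
      let label := PySem.List.slice ins none (some (-1))
      (st.1.insert label (st.1.getD label 0 - 1), st.2.1, st.2.2)
    else
      match PySem.Int.ofChars? [c] with
      | none => st  -- int() raises ValueError; excluded by Pre_part2
      | some f =>
        let label := PySem.List.slice ins none (some (-2))
        if st.1.getD label 0 = 0 then
          (st.1, (if st.2.2.contains label then st.2.1 else st.2.1 ++ [label]),
            st.2.2.insert label f)
        else st

-- body of B's pass-3 loop; state = (total, slots); focal[label] is present for every label in order
def part2B_sumstep (focal : PySem.Dict (List Char) Int) (st : Int × PySem.Dict Int Int)
    (label : List Char) : Int × PySem.Dict Int Int :=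
  let b : Int := ((hashB label : Nat) : Int)
  let slot := st.2.getD b 0 + 1
  (st.1 + (b + 1) * slot * focal.getD label 0, st.2.insert b slot)

def part2_alt (input : String) : Int :=
  let seq := parse_input input
  let pending := part2B_pending seq
  let st := seq.foldl part2B_step (pending, [], PySem.Dict.empty)
  (st.2.1.foldl (part2B_sumstep st.2.2) (0, PySem.Dict.empty)).1

-- ===== PRECONDITION & SPEC =====
-- Pre_part2 excludes exactly the inputs where Python A raises: a comma-separated token
-- that is empty (IndexError on its last character) or whose last character is neither a
-- minus sign nor an ASCII digit (ValueError on int of its last character).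
def Pre_part2 (input : String) : Prop :=
  ∀ t ∈ parse_input input,
    (t.getLast?.any (fun c => c == '-' || (48 ≤ c.toNat && c.toNat ≤ 57))) = true
instance (input : String) : Decidable (Pre_part2 input) := by unfold Pre_part2; infer_instance

def pvWitness_part2 : String := "rn=1,cm-,qp=3,cm=2,qp-"

def Spec_part2 (input : String) (out : Int) : Prop := out = part2_alt input
instance (input : String) (out : Int) : Decidable (Spec_part2 input out) := by
  unfold Spec_part2; infer_instance

-- ===== CLAIM (what is proved, stated in full; the proofs are below) =====
def Claim_equal_part2 : Prop :=
  ∀ (input : String), Dom_part2 input → Pre_part2 input → Spec_part2 input (part2 input)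

-- ===== LEMMAS AND PROOFS =====

-- hash facts
theorem hashB_lt (value : List Char) : hashB value < 256 := by
  unfold hashB
  have : ∀ (l : List Char) (h : Nat), h < 256 →
      l.foldl (fun h char => (h + char.toNat) * 17 % 256) h < 256 := by
    intro l
    induction l with
    | nil => intro h hh; simpa using hh
    | cons c cs ih =>
      intro h hh
      simp only [List.foldl_cons]
      exact ih _ (Nat.mod_lt _ (by norm_num))
  exact this value 0 (by norm_num)

theorem pyhash_eq (value : List Char) : pyhash value = ((hashB value : Nat) : Int) := by
  unfold pyhash hashB
  have : ∀ (l : List Char) (h : Nat),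
      l.foldl (fun current char => PySem.Int.mod ((current + (char.toNat : Int)) * 17) 256) (h : Int)
        = ((l.foldl (fun h char => (h + char.toNat) * 17 % 256) h : Nat) : Int) := by
    intro l
    induction l with
    | nil => intro h; simp
    | cons c cs ih =>
      intro h
      simp only [List.foldl_cons]
      have e1 : ((h : Int) + (c.toNat : Int)) * 17 = (((h + c.toNat) * 17 : Nat) : Int) := by
        push_cast; ring
      rw [e1, show ((256 : Int)) = ((256 : Nat) : Int) from rfl, PySem.Int.mod_natCast]
      exact ih _
  simpa using this value 0

-- the abstract instruction a token denotes
inductive LOp where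
  | del : List Char → LOp
  | set : List Char → Int → LOp
  | skip : LOp
deriving DecidableEq, Repr

def opOf (t : List Char) : LOp :=
  match PySem.List.pyGet? t (-1) with
  | none => .skip
  | some c =>
    if c = '-' then .del (PySem.List.slice t none (some (-1)))
    else
      match PySem.Int.ofChars? [c] with
      | none => .skip
      | some f => .set (PySem.List.slice t none (some (-2))) f

-- reference flat simulation (proof device): one ordered association list of all lenses
def removeFirst (label : List Char) : List (List Char × Int) → List (List Char × Int)
  | [] => []
  | (l, f) :: rest => if l = label then rest else (l, f) :: removeFirst label rest

def upsert (label : List Char) (focal : Int) : List (List Char × Int) → List (List Char × Int)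
  | [] => [(label, focal)]
  | (l, f) :: rest =>
    if l = label then (label, focal) :: rest else (l, f) :: upsert label focal rest

def flatT (L : List (List Char × Int)) (t : List Char) : List (List Char × Int) :=
  match opOf t with
  | .del lab => removeFirst lab L
  | .set lab f => upsert lab f L
  | .skip => L

def countDel (lab : List Char) (ss : List (List Char)) : Nat :=
  ss.countP (fun t => decide (opOf t = LOp.del lab))

theorem countDel_cons (lab : List Char) (t : List Char) (ss : List (List Char)) :
    countDel lab (t :: ss) = (if opOf t = LOp.del lab then 1 else 0) + countDel lab ss := by
  unfold countDel
  rw [List.countP_cons]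
  by_cases h : opOf t = LOp.del lab <;> simp [h] <;> omega

theorem flatT_skip (L : List (List Char × Int)) (t : List Char) (h : opOf t = LOp.skip) :
    flatT L t = L := by unfold flatT; rw [h]

theorem flatT_del (L : List (List Char × Int)) (t lab : List Char) (h : opOf t = LOp.del lab) :
    flatT L t = removeFirst lab L := by unfold flatT; rw [h]

theorem flatT_set (L : List (List Char × Int)) (t lab : List Char) (v : Int)
    (h : opOf t = LOp.set lab v) : flatT L t = upsert lab v L := by unfold flatT; rw [h]

-- step shapes: both ports' loop bodies, by the op the token denotes
theorem part2_step_skip (A : PySem.Dict Int (PySem.Dict (List Char) Int)) (t : List Char)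
    (h : opOf t = LOp.skip) : part2_step A t = A := by
  unfold opOf at h
  unfold part2_step
  cases hg : PySem.List.pyGet? t (-1) with
  | none => rfl
  | some c =>
    rw [hg] at h
    by_cases hc : c = '-'
    · simp [hc] at h
    · simp only [hc, if_false] at h ⊢
      cases ho : PySem.Int.ofChars? [c] with
      | none => rfl
      | some f => rw [ho] at h; simp at h

theorem part2_step_del (A : PySem.Dict Int (PySem.Dict (List Char) Int)) (t lab : List Char)
    (h : opOf t = LOp.del lab) :
    part2_step A t = A.insert (pyhash lab) ((A.getD (pyhash lab) PySem.Dict.empty).erase lab) := by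
  unfold opOf at h
  unfold part2_step
  cases hg : PySem.List.pyGet? t (-1) with
  | none => rw [hg] at h; simp at h
  | some c =>
    rw [hg] at h
    by_cases hc : c = '-'
    · simp only [hc, if_true] at h ⊢
      cases h
      rfl
    · simp only [hc, if_false] at h
      cases ho : PySem.Int.ofChars? [c] with
      | none => rw [ho] at h; simp at h
      | some f => rw [ho] at h; simp at h

theorem part2_step_set (A : PySem.Dict Int (PySem.Dict (List Char) Int)) (t lab : List Char)
    (v : Int) (h : opOf t = LOp.set lab v) :
    part2_step A t = A.insert (pyhash lab) ((A.getD (pyhash lab) PySem.Dict.empty).insert lab v) := by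
  unfold opOf at h
  unfold part2_step
  cases hg : PySem.List.pyGet? t (-1) with
  | none => rw [hg] at h; simp at h
  | some c =>
    rw [hg] at h
    by_cases hc : c = '-'
    · simp [hc] at h
    · simp only [hc, if_false] at h ⊢
      cases ho : PySem.Int.ofChars? [c] with
      | none => rw [ho] at h; simp at h
      | some f =>
        rw [ho] at h
        injection h with h1 h2
        subst h1; subst h2
        rfl

theorem part2B_step_skip
    (st : PySem.Dict (List Char) Int × List (List Char) × PySem.Dict (List Char) Int)
    (t : List Char) (h : opOf t = LOp.skip) : part2B_step st t = st := by
  unfold opOf at h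
  unfold part2B_step
  cases hg : PySem.List.pyGet? t (-1) with
  | none => rfl
  | some c =>
    rw [hg] at h
    by_cases hc : c = '-'
    · simp [hc] at h
    · simp only [hc, if_false] at h ⊢
      cases ho : PySem.Int.ofChars? [c] with
      | none => rfl
      | some f => rw [ho] at h; simp at h

theorem part2B_step_del
    (st : PySem.Dict (List Char) Int × List (List Char) × PySem.Dict (List Char) Int)
    (t lab : List Char) (h : opOf t = LOp.del lab) :
    part2B_step st t = (st.1.insert lab (st.1.getD lab 0 - 1), st.2.1, st.2.2) := by
  unfold opOf at h
  unfold part2B_step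
  cases hg : PySem.List.pyGet? t (-1) with
  | none => rw [hg] at h; simp at h
  | some c =>
    rw [hg] at h
    by_cases hc : c = '-'
    · simp only [hc, if_true] at h ⊢
      cases h
      rfl
    · simp only [hc, if_false] at h
      cases ho : PySem.Int.ofChars? [c] with
      | none => rw [ho] at h; simp at h
      | some f => rw [ho] at h; simp at h

theorem part2B_step_set
    (st : PySem.Dict (List Char) Int × List (List Char) × PySem.Dict (List Char) Int)
    (t lab : List Char) (v : Int) (h : opOf t = LOp.set lab v) :
    part2B_step st t =
      if st.1.getD lab 0 = 0 then
        (st.1, (if st.2.2.contains lab then st.2.1 else st.2.1 ++ [lab]), st.2.2.insert lab v)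
      else st := by
  unfold opOf at h
  unfold part2B_step
  cases hg : PySem.List.pyGet? t (-1) with
  | none => rw [hg] at h; simp at h
  | some c =>
    rw [hg] at h
    by_cases hc : c = '-'
    · simp [hc] at h
    · simp only [hc, if_false] at h ⊢
      cases ho : PySem.Int.ofChars? [c] with
      | none => rw [ho] at h; simp at h
      | some f =>
        rw [ho] at h
        injection h with h1 h2
        subst h1; subst h2
        rfl

-- removeFirst / upsert algebra
theorem removeFirst_of_not_mem (lab : List Char) :
    ∀ (L : List (List Char × Int)), lab ∉ L.map Prod.fst → removeFirst lab L = L := by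
  intro L
  induction L with
  | nil => intro _; rfl
  | cons p rest ih =>
    intro h
    obtain ⟨l, f⟩ := p
    have hl : l ≠ lab := fun he => h (by simp [he])
    simp [removeFirst, hl, ih (fun hm => h (by simp [hm]))]

theorem removeFirst_append_not_mem (lab : List Char) (L M : List (List Char × Int))
    (h : lab ∉ L.map Prod.fst) :
    removeFirst lab (L ++ M) = L ++ removeFirst lab M := by
  induction L with
  | nil => rfl
  | cons p rest ih =>
    obtain ⟨l, f⟩ := p
    have hl : l ≠ lab := fun he => h (by simp [he])
    simp only [List.cons_append, removeFirst, hl, if_false, List.cons_inj_right]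
    exact ih (fun hm => h (by simp [hm]))

theorem upsert_of_not_mem (lab : List Char) (v : Int) :
    ∀ (L : List (List Char × Int)), lab ∉ L.map Prod.fst →
      upsert lab v L = L ++ [(lab, v)] := by
  intro L
  induction L with
  | nil => intro _; rfl
  | cons p rest ih =>
    intro h
    obtain ⟨l, f⟩ := p
    have hl : l ≠ lab := fun he => h (by simp [he])
    simp [upsert, hl, ih (fun hm => h (by simp [hm]))]

theorem map_fst_upsert_mem (lab : List Char) (v : Int) :
    ∀ (L : List (List Char × Int)), lab ∈ L.map Prod.fst →
      (upsert lab v L).map Prod.fst = L.map Prod.fst := by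
  intro L
  induction L with
  | nil => intro h; simp at h
  | cons p rest ih =>
    intro h
    obtain ⟨l, f⟩ := p
    by_cases hl : l = lab
    · simp [upsert, hl]
    · have hm : lab ∈ rest.map Prod.fst := by
        rw [List.map_cons] at h
        rcases List.mem_cons.mp h with h' | h'
        · exact absurd h'.symm hl
        · exact h'
      simp [upsert, hl, ih hm]

theorem nodup_upsert (lab : List Char) (v : Int) (L : List (List Char × Int))
    (h : (L.map Prod.fst).Nodup) : ((upsert lab v L).map Prod.fst).Nodup := by
  by_cases hm : lab ∈ L.map Prod.fst
  · rw [map_fst_upsert_mem lab v L hm]; exact h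
  · rw [upsert_of_not_mem lab v L hm, List.map_append]
    simp only [List.map_cons, List.map_nil]
    rw [List.nodup_append]
    exact ⟨h, List.nodup_singleton lab, by
      intro a ha
      simp only [List.mem_singleton, forall_eq, ne_eq]
      intro hal
      exact hm (hal ▸ ha)⟩

theorem mem_upsert_nodup (lab : List Char) (v : Int) :
    ∀ (L : List (List Char × Int)), (L.map Prod.fst).Nodup →
      ∀ p ∈ upsert lab v L, p = (lab, v) ∨ (p ∈ L ∧ p.1 ≠ lab) := by
  intro L
  induction L with
  | nil =>
    intro _ p hp
    simp only [upsert, List.mem_singleton] at hp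
    exact Or.inl hp
  | cons q rest ih =>
    intro hnd p hp
    obtain ⟨l, f⟩ := q
    simp only [List.map_cons, List.nodup_cons] at hnd
    by_cases hl : l = lab
    · subst hl
      have hu : upsert l v ((l, f) :: rest) = (l, v) :: rest := by simp [upsert]
      rw [hu] at hp
      rcases List.mem_cons.mp hp with hp | hp
      · exact Or.inl hp
      · right
        refine ⟨List.mem_cons_of_mem _ hp, ?_⟩
        intro he
        exact hnd.1 (he ▸ List.mem_map_of_mem hp)
    · have hu : upsert lab v ((l, f) :: rest) = (l, f) :: upsert lab v rest := by
        simp [upsert, hl]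
      rw [hu] at hp
      rcases List.mem_cons.mp hp with hp | hp
      · exact Or.inr ⟨by simp [hp], by simp [hp, hl]⟩
      · rcases ih hnd.2 p hp with h | h
        · exact Or.inl h
        · exact Or.inr ⟨List.mem_cons_of_mem _ h.1, h.2⟩

theorem removeFirst_upsert_self (lab : List Char) (v : Int) :
    ∀ (L : List (List Char × Int)),
      removeFirst lab (upsert lab v L) = removeFirst lab L := by
  intro L
  induction L with
  | nil => simp [upsert, removeFirst]
  | cons p rest ih =>
    obtain ⟨l, f⟩ := p
    by_cases hl : l = lab
    · simp [upsert, removeFirst, hl]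
    · simp [upsert, removeFirst, hl, ih]

theorem removeFirst_comm (lab l : List Char) (h : l ≠ lab) :
    ∀ (L : List (List Char × Int)),
      removeFirst lab (removeFirst l L) = removeFirst l (removeFirst lab L) := by
  intro L
  induction L with
  | nil => rfl
  | cons p rest ih =>
    obtain ⟨k, f⟩ := p
    by_cases hk1 : k = l
    · subst hk1
      simp [removeFirst, h, Ne.symm h]
    · by_cases hk2 : k = lab
      · subst hk2
        simp [removeFirst, hk1]
      · simp [removeFirst, hk1, hk2, ih]

theorem removeFirst_upsert_comm (lab l : List Char) (v : Int) (h : l ≠ lab) :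
    ∀ (L : List (List Char × Int)),
      removeFirst lab (upsert l v L) = upsert l v (removeFirst lab L) := by
  intro L
  induction L with
  | nil => simp [upsert, removeFirst, h]
  | cons p rest ih =>
    obtain ⟨k, f⟩ := p
    by_cases hk1 : k = l
    · subst hk1
      simp [upsert, removeFirst, h, Ne.symm h]
    · by_cases hk2 : k = lab
      · subst hk2
        simp [upsert, removeFirst, hk1, Ne.symm h]
      · simp [upsert, removeFirst, hk1, hk2, ih]

-- filter (per box) commutes with the flat operations
theorem filter_removeFirst_eq (lab : List Char) (n : Nat) (hn : hashB lab = n) :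
    ∀ (L : List (List Char × Int)),
      (removeFirst lab L).filter (fun p => hashB p.1 == n)
        = removeFirst lab (L.filter (fun p => hashB p.1 == n)) := by
  intro L
  induction L with
  | nil => rfl
  | cons p rest ih =>
    obtain ⟨l, f⟩ := p
    by_cases hl : l = lab
    · subst hl
      simp [removeFirst, List.filter_cons, hn]
    · by_cases hh : hashB l = n
      · simp [removeFirst, List.filter_cons, hl, hh, ih]
      · simp [removeFirst, List.filter_cons, hl, hh, ih]

theorem filter_removeFirst_ne (lab : List Char) (n : Nat) (hn : hashB lab ≠ n) :
    ∀ (L : List (List Char × Int)),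
      (removeFirst lab L).filter (fun p => hashB p.1 == n)
        = L.filter (fun p => hashB p.1 == n) := by
  intro L
  induction L with
  | nil => rfl
  | cons p rest ih =>
    obtain ⟨l, f⟩ := p
    by_cases hl : l = lab
    · subst hl
      simp [removeFirst, List.filter_cons, hn]
    · by_cases hh : hashB l = n
      · simp [removeFirst, List.filter_cons, hl, hh, ih]
      · simp [removeFirst, List.filter_cons, hl, hh, ih]

theorem filter_upsert_eq (lab : List Char) (v : Int) (n : Nat) (hn : hashB lab = n) :
    ∀ (L : List (List Char × Int)),
      (upsert lab v L).filter (fun p => hashB p.1 == n)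
        = upsert lab v (L.filter (fun p => hashB p.1 == n)) := by
  intro L
  induction L with
  | nil => simp [upsert, List.filter_cons, hn]
  | cons p rest ih =>
    obtain ⟨l, f⟩ := p
    by_cases hl : l = lab
    · subst hl
      simp [upsert, List.filter_cons, hn]
    · by_cases hh : hashB l = n
      · simp [upsert, List.filter_cons, hl, hh, ih]
      · simp [upsert, List.filter_cons, hl, hh, ih]

theorem filter_upsert_ne (lab : List Char) (v : Int) (n : Nat) (hn : hashB lab ≠ n) :
    ∀ (L : List (List Char × Int)),
      (upsert lab v L).filter (fun p => hashB p.1 == n)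
        = L.filter (fun p => hashB p.1 == n) := by
  intro L
  induction L with
  | nil => simp [upsert, List.filter_cons, hn]
  | cons p rest ih =>
    obtain ⟨l, f⟩ := p
    by_cases hl : l = lab
    · subst hl
      simp [upsert, List.filter_cons, hn]
    · by_cases hh : hashB l = n
      · simp [upsert, List.filter_cons, hl, hh, ih]
      · simp [upsert, List.filter_cons, hl, hh, ih]

-- list-level characterisations of Dict.erase / Dict.insert under nodup keys
theorem filter_eq_removeFirst (label : List Char) :
    ∀ (l : List (List Char × Int)), (l.map Prod.fst).Nodup →
      l.filter (fun p => !(p.1 == label)) = removeFirst label l := by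
  intro l
  induction l with
  | nil => intro _; rfl
  | cons p rest ih =>
    intro hnd
    obtain ⟨k, v⟩ := p
    simp only [List.map_cons, List.nodup_cons] at hnd
    by_cases hk : k = label
    · subst hk
      have hrest : rest.filter (fun p => !(p.1 == k)) = rest := by
        apply List.filter_eq_self.mpr
        intro p hp
        have : p.1 ≠ k := by
          intro h; exact hnd.1 (h ▸ List.mem_map_of_mem hp)
        simp [this]
      simp [removeFirst, hrest]
    · simp [removeFirst, hk, ih hnd.2]

theorem map_eq_upsert (label : List Char) (focal : Int) :
    ∀ (l : List (List Char × Int)), (l.map Prod.fst).Nodup → label ∈ l.map Prod.fst →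
      l.map (fun p => if p.1 == label then (label, focal) else p) = upsert label focal l := by
  intro l
  induction l with
  | nil => intro _ h; simp at h
  | cons p rest ih =>
    intro hnd hmem
    obtain ⟨k, v⟩ := p
    simp only [List.map_cons, List.nodup_cons] at hnd
    by_cases hk : k = label
    · subst hk
      have h' : ∀ p ∈ rest, (if p.1 == k then (k, focal) else p) = id p := by
        intro p hp
        have hne : (p.1 == k) = false := by
          have : p.1 ≠ k := fun h => hnd.1 (h ▸ List.mem_map_of_mem hp)
          simpa using this
        simp [hne]
      rw [List.map_cons, List.map_congr_left h', List.map_id]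
      simp [upsert]
    · have hmem' : label ∈ rest.map Prod.fst := by
        rcases List.mem_cons.mp hmem with h | h
        · exact absurd h.symm hk
        · exact h
      rw [List.map_cons, ih hnd.2 hmem']
      have hkb : ((k, v).1 == label) = false := by simpa using hk
      simp [upsert, hkb, hk]

theorem erase_items (d : PySem.Dict (List Char) Int) (label : List Char)
    (h : d.keys.Nodup) : (d.erase label).items = removeFirst label d.items := by
  have := filter_eq_removeFirst label d.items h
  simpa [PySem.Dict.erase] using this

theorem insert_items (d : PySem.Dict (List Char) Int) (label : List Char) (focal : Int)
    (h : d.keys.Nodup) : (d.insert label focal).items = upsert label focal d.items := by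
  simp only [PySem.Dict.insert]
  by_cases hc : d.contains label = true
  · have hmem : label ∈ d.items.map Prod.fst := by
      simpa [PySem.Dict.keys] using (PySem.Dict.contains_iff_mem_keys (d := d) (k := label)).mp hc
    rw [if_pos hc]
    exact map_eq_upsert label focal d.items h hmem
  · have hmem : label ∉ d.items.map Prod.fst := by
      intro hm
      exact hc ((PySem.Dict.contains_iff_mem_keys (d := d) (k := label)).mpr
        (by simpa [PySem.Dict.keys] using hm))
    rw [if_neg hc]
    exact (upsert_of_not_mem label focal d.items hmem).symm

theorem keys_erase_nodup {κ ν : Type} [BEq κ] (d : PySem.Dict κ ν) (k : κ)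
    (h : d.keys.Nodup) : (d.erase k).keys.Nodup := by
  simp only [PySem.Dict.erase, PySem.Dict.keys] at *
  exact List.Nodup.sublist (List.filter_sublist.map Prod.fst) h

-- the invariant relating A's dict of dicts to the flat simulation
def AInv (A : PySem.Dict Int (PySem.Dict (List Char) Int))
    (L : List (List Char × Int)) : Prop :=
  A.keys.Nodup ∧
  (∀ k ∈ A.keys, ∃ n : Nat, n < 256 ∧ k = (n : Int)) ∧
  (∀ n : Nat, n < 256 →
    (A.getD (n : Int) PySem.Dict.empty).keys.Nodup ∧
    (A.getD (n : Int) PySem.Dict.empty).items = L.filter (fun p => hashB p.1 == n))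

theorem Astep (A : PySem.Dict Int (PySem.Dict (List Char) Int)) (L : List (List Char × Int))
    (t : List Char) (h : AInv A L) : AInv (part2_step A t) (flatT L t) := by
  obtain ⟨hnd, hbound, hpt⟩ := h
  cases hop : opOf t with
  | skip => rw [part2_step_skip A t hop, flatT_skip L t hop]; exact ⟨hnd, hbound, hpt⟩
  | del lab =>
    rw [part2_step_del A t lab hop, flatT_del L t lab hop]
    have hpe := pyhash_eq lab
    have hlt := hashB_lt lab
    refine ⟨PySem.Dict.nodup_keys_insert _ _ _ hnd, ?_, ?_⟩
    · intro k hk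
      rcases (PySem.Dict.mem_keys_insert _ _ _ _).mp hk with h | h
      · exact ⟨hashB lab, hlt, by rw [h, hpe]⟩
      · exact hbound k h
    · intro n hn
      rw [PySem.Dict.getD_insert]
      by_cases hnb : n = hashB lab
      · have hcast : ((n : Nat) : Int) = pyhash lab := by rw [hpe, hnb]
        rw [if_pos hcast]
        have hdnd := (hpt n hn).1
        have hitems := (hpt n hn).2
        rw [hcast] at hdnd hitems
        refine ⟨keys_erase_nodup _ _ hdnd, ?_⟩
        rw [erase_items _ _ hdnd, hitems]
        exact (filter_removeFirst_eq lab n hnb.symm L).symm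
      · have hne : ((n : Nat) : Int) ≠ pyhash lab := by
          rw [hpe]; intro hcontr; exact hnb (by exact_mod_cast hcontr)
        rw [if_neg hne, filter_removeFirst_ne lab n (fun he => hnb he.symm)]
        exact hpt n hn
  | set lab v =>
    rw [part2_step_set A t lab v hop, flatT_set L t lab v hop]
    have hpe := pyhash_eq lab
    have hlt := hashB_lt lab
    refine ⟨PySem.Dict.nodup_keys_insert _ _ _ hnd, ?_, ?_⟩
    · intro k hk
      rcases (PySem.Dict.mem_keys_insert _ _ _ _).mp hk with h | h
      · exact ⟨hashB lab, hlt, by rw [h, hpe]⟩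
      · exact hbound k h
    · intro n hn
      rw [PySem.Dict.getD_insert]
      by_cases hnb : n = hashB lab
      · have hcast : ((n : Nat) : Int) = pyhash lab := by rw [hpe, hnb]
        rw [if_pos hcast]
        have hdnd := (hpt n hn).1
        have hitems := (hpt n hn).2
        rw [hcast] at hdnd hitems
        refine ⟨PySem.Dict.nodup_keys_insert _ _ _ hdnd, ?_⟩
        rw [insert_items _ _ _ hdnd, hitems]
        exact (filter_upsert_eq lab v n hnb.symm L).symm
      · have hne : ((n : Nat) : Int) ≠ pyhash lab := by
          rw [hpe]; intro hcontr; exact hnb (by exact_mod_cast hcontr)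
        rw [if_neg hne, filter_upsert_ne lab v n (fun he => hnb he.symm)]
        exact hpt n hn

theorem Afold (ss : List (List Char)) :
    ∀ (A : PySem.Dict Int (PySem.Dict (List Char) Int)) (L : List (List Char × Int)),
      AInv A L → AInv (ss.foldl part2_step A) (ss.foldl flatT L) := by
  induction ss with
  | nil => intro A L h; exact h
  | cons t ts ih =>
    intro A L h
    simp only [List.foldl_cons]
    exact ih _ _ (Astep A L t h)

theorem Ainit : AInv PySem.Dict.empty [] := by
  refine ⟨by simp [PySem.Dict.keys, PySem.Dict.empty], ?_, ?_⟩
  · intro k hk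
    simp [PySem.Dict.keys, PySem.Dict.empty] at hk
  · intro n hn
    constructor <;> simp [PySem.Dict.getD, PySem.Dict.get?, PySem.Dict.keys, PySem.Dict.empty]

-- irrelevance: an entry that a later '-' for its label removes does not affect the final flat state
theorem foldl_flat_irrel (lab : List Char) :
    ∀ (ss : List (List Char)) (L L' : List (List Char × Int)),
      removeFirst lab L = removeFirst lab L' → countDel lab ss ≠ 0 →
      ss.foldl flatT L = ss.foldl flatT L' := by
  intro ss
  induction ss with
  | nil => intro L L' _ hc; simp [countDel] at hc
  | cons t ts ih =>
    intro L L' hrm hc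
    simp only [List.foldl_cons]
    rw [countDel_cons] at hc
    cases hop : opOf t with
    | skip =>
      rw [flatT_skip L t hop, flatT_skip L' t hop]
      exact ih L L' hrm (by rw [hop] at hc; simpa using hc)
    | del l =>
      rw [flatT_del L t l hop, flatT_del L' t l hop]
      by_cases hl : l = lab
      · subst hl
        rw [hrm]
      · refine ih _ _ ?_ ?_
        · rw [removeFirst_comm lab l hl, removeFirst_comm lab l hl, hrm]
        · rw [hop] at hc
          have hne : ¬ (LOp.del l = LOp.del lab) := by
            intro he; injection he with h'; exact hl h'
          simpa [hne] using hc
    | set l v =>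
      rw [flatT_set L t l v hop, flatT_set L' t l v hop]
      by_cases hl : l = lab
      · subst hl
        refine ih _ _ ?_ (by rw [hop] at hc; simpa using hc)
        rw [removeFirst_upsert_self, removeFirst_upsert_self, hrm]
      · refine ih _ _ ?_ (by rw [hop] at hc; simpa using hc)
        rw [removeFirst_upsert_comm lab l v hl, removeFirst_upsert_comm lab l v hl, hrm]

-- pass 1 counts exactly the '-' instructions per label
theorem opOf_del_iff (t lab : List Char) :
    opOf t = LOp.del lab ↔
      (PySem.List.pyGet? t (-1) = some '-' ∧
        PySem.List.slice t none (some (-1)) = lab) := by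
  unfold opOf
  cases hg : PySem.List.pyGet? t (-1) with
  | none => simp
  | some c =>
    by_cases hc : c = '-'
    · subst hc
      simp
    · cases ho : PySem.Int.ofChars? [c] with
      | none => simp [hc, ho]
      | some f => simp [hc, ho]

theorem pending_spec (seq : List (List Char)) (lab : List Char) :
    (part2B_pending seq).getD lab 0 = (countDel lab seq : Int) := by
  unfold part2B_pending
  rw [PySem.Dict.getD_counter]
  congr 1
  rw [List.count_eq_countP, List.countP_map, List.countP_filter]
  unfold countDel
  apply List.countP_congr
  intro t _
  rw [Bool.eq_iff_iff]
  simp only [Function.comp_apply, Bool.and_eq_true, beq_iff_eq, decide_eq_true_eq]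
  rw [opOf_del_iff]
  tauto

-- pass 2 computes exactly the flat simulation's final labels (in order) and focal lengths
theorem Bside :
    ∀ (ss : List (List Char)) (pending focal : PySem.Dict (List Char) Int)
      (order : List (List Char)) (L : List (List Char × Int)),
      (L.map Prod.fst).Nodup →
      order = L.map Prod.fst →
      (∀ p ∈ L, focal.getD p.1 0 = p.2) →
      (∀ lab, focal.contains lab = true ↔ lab ∈ order) →
      (∀ lab, pending.getD lab 0 = (countDel lab ss : Int)) →
      (∀ p ∈ L, countDel p.1 ss = 0) →
      ((ss.foldl part2B_step (pending, order, focal)).2.1 = (ss.foldl flatT L).map Prod.fst ∧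
       (∀ p ∈ ss.foldl flatT L,
          (ss.foldl part2B_step (pending, order, focal)).2.2.getD p.1 0 = p.2) ∧
       ((ss.foldl flatT L).map Prod.fst).Nodup) := by
  intro ss
  induction ss with
  | nil =>
    intro pending focal order L hnd horder hfoc _ _ _
    exact ⟨horder, fun p hp => hfoc p hp, hnd⟩
  | cons t ts ih =>
    intro pending focal order L hnd horder hfoc hcont hpend hmem
    simp only [List.foldl_cons]
    cases hop : opOf t with
    | skip =>
      rw [part2B_step_skip _ t hop]
      rw [flatT_skip L t hop]
      refine ih pending focal order L hnd horder hfoc hcont ?_ ?_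
      · intro lab
        have := hpend lab
        rw [countDel_cons, hop] at this
        simpa using this
      · intro p hp
        have := hmem p hp
        rw [countDel_cons, hop] at this
        simpa using this
    | del lab =>
      rw [part2B_step_del _ t lab hop]
      have hlabL : lab ∉ L.map Prod.fst := by
        intro hm
        obtain ⟨p, hp, hpe⟩ := List.mem_map.mp hm
        have h0 := hmem p hp
        rw [hpe, countDel_cons, hop, if_pos rfl] at h0
        omega
      rw [show flatT L t = L from by
        rw [flatT_del L t lab hop]; exact removeFirst_of_not_mem lab L hlabL]
      refine ih _ focal order L hnd horder hfoc hcont ?_ ?_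
      · intro l
        rw [PySem.Dict.getD_insert]
        by_cases hl : l = lab
        · subst hl
          rw [if_pos rfl, hpend l, countDel_cons, hop, if_pos rfl]
          push_cast
          ring
        · rw [if_neg hl, hpend l, countDel_cons, hop]
          have hne : ¬ (LOp.del lab = LOp.del l) := by
            intro he; injection he with h'; exact hl h'.symm
          simp [hne]
      · intro p hp
        have := hmem p hp
        rw [countDel_cons, hop] at this
        split_ifs at this with hif
        · omega
        · simpa using this
    | set lab v =>
      rw [part2B_step_set _ t lab v hop]
      have hpendlab : pending.getD lab 0 = (countDel lab ts : Int) := by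
        rw [hpend lab, countDel_cons, hop]
        simp
      rw [flatT_set L t lab v hop]
      have hpend' : ∀ l, pending.getD l 0 = (countDel l ts : Int) := by
        intro l
        rw [hpend l, countDel_cons, hop]
        have : ¬ (LOp.set lab v = LOp.del l) := by intro he; cases he
        simp [this]
      by_cases hz : countDel lab ts = 0
      · rw [if_pos (by rw [hpendlab, hz]; rfl)]
        by_cases hmemo : lab ∈ order
        · have hcl : focal.contains lab = true := (hcont lab).mpr hmemo
          rw [if_pos hcl]
          have hmemL : lab ∈ L.map Prod.fst := horder ▸ hmemo
          refine ih pending (focal.insert lab v) order (upsert lab v L)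
            (nodup_upsert lab v L hnd)
            (by rw [horder, map_fst_upsert_mem lab v L hmemL]) ?_ ?_ hpend' ?_
          · intro p hp
            rcases mem_upsert_nodup lab v L hnd p hp with h | h
            · rw [h, PySem.Dict.getD_insert, if_pos rfl]
            · rw [PySem.Dict.getD_insert, if_neg h.2]
              exact hfoc p h.1
          · intro l
            rw [PySem.Dict.contains_insert]
            by_cases hl : l = lab
            · subst hl
              constructor
              · intro _; exact hmemo
              · intro _; simp
            · have hbeq : (l == lab) = false := by simpa using hl
              rw [hbeq, Bool.false_or]
              exact hcont l
          · intro p hp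
            rcases mem_upsert_nodup lab v L hnd p hp with h | h
            · rw [h]; exact hz
            · have := hmem p h.1
              rw [countDel_cons, hop] at this
              simpa using this
        · have hcl : focal.contains lab = false := by
            cases h : focal.contains lab
            · rfl
            · exact absurd ((hcont lab).mp h) hmemo
          rw [hcl, if_neg (by simp)]
          have hmemL : lab ∉ L.map Prod.fst := fun h => hmemo (horder ▸ h)
          have hupe : upsert lab v L = L ++ [(lab, v)] := upsert_of_not_mem lab v L hmemL
          refine ih pending (focal.insert lab v) (order ++ [lab]) (upsert lab v L)
            (nodup_upsert lab v L hnd)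
            (by rw [hupe, List.map_append, horder]; rfl) ?_ ?_ hpend' ?_
          · intro p hp
            rw [hupe, List.mem_append] at hp
            rcases hp with hp | hp
            · have hpne : p.1 ≠ lab := by
                intro he
                exact hmemL (he ▸ List.mem_map_of_mem hp)
              rw [PySem.Dict.getD_insert, if_neg hpne]
              exact hfoc p hp
            · rw [List.mem_singleton] at hp
              rw [hp, PySem.Dict.getD_insert, if_pos rfl]
          · intro l
            rw [PySem.Dict.contains_insert]
            by_cases hl : l = lab
            · subst hl; simp
            · have hbeq : (l == lab) = false := by simpa using hl
              rw [hbeq, Bool.false_or, hcont l]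
              simp [hl]
          · intro p hp
            rw [hupe, List.mem_append] at hp
            rcases hp with hp | hp
            · have := hmem p hp
              rw [countDel_cons, hop] at this
              simpa using this
            · rw [List.mem_singleton] at hp
              rw [hp]
              exact hz
      · rw [if_neg (by rw [hpendlab]; exact_mod_cast hz)]
        have hmemL : lab ∉ L.map Prod.fst := by
          intro hm
          obtain ⟨p, hp, hpe⟩ := List.mem_map.mp hm
          have h0 := hmem p hp
          rw [hpe, countDel_cons, hop] at h0
          simp at h0
          exact hz (hpe ▸ h0)
        have hupe : upsert lab v L = L ++ [(lab, v)] := upsert_of_not_mem lab v L hmemL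
        have hirr : ts.foldl flatT (upsert lab v L) = ts.foldl flatT L := by
          apply foldl_flat_irrel lab
          · rw [hupe, removeFirst_append_not_mem lab L _ hmemL,
              removeFirst_of_not_mem lab L hmemL]
            simp [removeFirst]
          · exact hz
        rw [hirr]
        exact ih pending focal order L hnd horder hfoc hcont hpend' (by
          intro p hp
          have := hmem p hp
          rw [countDel_cons, hop] at this
          simpa using this)

-- sum-side lemmas
theorem enumerate_map {α β : Type} (t : α → β) (l : List α) (s : Int) :
    PySem.List.enumerate (l.map t) s = (PySem.List.enumerate l s).map (fun p => (p.1, t p.2)) := by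
  induction l generalizing s with
  | nil => simp [PySem.List.enumerate_nil]
  | cons x xs ih => simp [PySem.List.enumerate_cons, ih]

theorem sum_eq_sum_filter (f : Int → Int) (p : Int → Bool) :
    ∀ (l : List Int), (∀ x ∈ l, p x = false → f x = 0) →
      (l.map f).sum = ((l.filter p).map f).sum := by
  intro l
  induction l with
  | nil => intro _; rfl
  | cons x xs ih =>
    intro h
    by_cases hp : p x = true
    · simp [hp, ih (fun y hy => h y (List.mem_cons_of_mem _ hy))]
    · have hx0 : f x = 0 := h x (List.mem_cons_self) (by simpa using hp)
      simp [hp, hx0, ih (fun y hy => h y (List.mem_cons_of_mem _ hy))]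

theorem sum_over_keys (f : Int → Int) (l R : List Int) (hndl : l.Nodup) (hndR : R.Nodup)
    (hsub : ∀ k ∈ l, k ∈ R) (hz : ∀ b ∈ R, b ∉ l → f b = 0) :
    (l.map f).sum = (R.map f).sum := by
  have h1 : (R.map f).sum = ((R.filter (fun b => decide (b ∈ l))).map f).sum := by
    apply sum_eq_sum_filter
    intro x hx hfx
    exact hz x hx (by simpa using hfx)
  have hperm : l.Perm (R.filter (fun b => decide (b ∈ l))) := by
    rw [List.perm_ext_iff_of_nodup hndl (hndR.filter _)]
    intro a
    simp only [List.mem_filter, decide_eq_true_eq]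
    exact ⟨fun h => ⟨hsub a h, h⟩, fun h => h.2⟩
  rw [h1, ← (hperm.map f).sum_eq]

-- per-box contributions
def boxContrib (A : PySem.Dict Int (PySem.Dict (List Char) Int)) (k : Int) : Int :=
  ((PySem.List.enumerate (A.getD k PySem.Dict.empty).items 1).map
    (fun q => (k + 1) * q.1 * q.2.2)).sum

def F (L : List (List Char × Int)) (n : Nat) : Int :=
  ((PySem.List.enumerate (L.filter (fun p => hashB p.1 == n)) 1).map
    (fun q => ((n : Int) + 1) * q.1 * q.2.2)).sum

-- a range sum that changes at exactly one index
theorem sum_range_update (f g : Nat → Int) :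
    ∀ (m : Nat) (h : Nat) (d : Int), h < m → (∀ n, n ≠ h → g n = f n) → g h = f h + d →
      ((List.range m).map g).sum = ((List.range m).map f).sum + d := by
  intro m
  induction m with
  | zero => intro h d hm; omega
  | succ m ih =>
    intro h d hm hne hh
    rw [List.range_succ, List.map_append, List.map_append, List.sum_append, List.sum_append]
    by_cases hhm : h = m
    · have hmap : ((List.range m).map g) = ((List.range m).map f) := by
        apply List.map_congr_left
        intro n hn
        exact hne n (by have := List.mem_range.mp hn; omega)
      have hgm : g m = f m + d := hhm ▸ hh
      rw [hmap]
      simp only [List.map_cons, List.map_nil, List.sum_cons, List.sum_nil]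
      rw [hgm]
      ring
    · rw [ih h d (by omega) hne hh]
      have : g m = f m := hne m (fun he => hhm he.symm)
      simp only [List.map_cons, List.map_nil, List.sum_cons, List.sum_nil]
      rw [this]
      ring

-- pass 3 computes the grand total of per-box focusing powers
theorem Bsum_aux :
    ∀ (L : List (List Char × Int)) (focal : PySem.Dict (List Char) Int),
      (∀ p ∈ L, focal.getD p.1 0 = p.2) →
      ((∀ n : Int,
          ((L.map Prod.fst).foldl (part2B_sumstep focal) (0, PySem.Dict.empty)).2.getD n 0
            = ((L.filter (fun p => ((hashB p.1 : Nat) : Int) == n)).length : Int)) ∧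
       ((L.map Prod.fst).foldl (part2B_sumstep focal) (0, PySem.Dict.empty)).1
          = ((List.range 256).map (fun n => F L n)).sum) := by
  intro L
  induction L using List.reverseRecOn with
  | nil =>
    intro focal _
    constructor
    · intro n
      simp only [List.map_nil, List.foldl_nil, List.filter_nil, List.length_nil, Nat.cast_zero]
      rw [PySem.Dict.getD_empty]
    · have : ∀ n ∈ List.range 256, F ([] : List (List Char × Int)) n = 0 := by
        intro n _
        simp [F, PySem.List.enumerate_nil]
      rw [List.map_congr_left this]
      simp only [List.map_nil, List.foldl_nil, List.map_const']
      rw [List.sum_replicate]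
      simp
  | append_singleton M e ih =>
    intro focal hfoc
    have hfocM : ∀ p ∈ M, focal.getD p.1 0 = p.2 := by
      intro p hp; exact hfoc p (List.mem_append_left _ hp)
    obtain ⟨ihc, ihs⟩ := ih focal hfocM
    obtain ⟨lab, fv⟩ := e
    have hfe : focal.getD lab 0 = fv := hfoc (lab, fv) (List.mem_append_right _ (by simp))
    set h := hashB lab with hh
    set b : Int := ((h : Nat) : Int) with hb
    set r := ((M.map Prod.fst).foldl (part2B_sumstep focal) (0, PySem.Dict.empty)) with hr
    have hfold : ((M ++ [(lab, fv)]).map Prod.fst).foldl (part2B_sumstep focal)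
        (0, PySem.Dict.empty) = part2B_sumstep focal r lab := by
      rw [List.map_append, List.foldl_append]
      rfl
    have hcnt_nat : ∀ (X : List (List Char × Int)),
        X.filter (fun p => ((hashB p.1 : Nat) : Int) == b) = X.filter (fun p => hashB p.1 == h) := by
      intro X
      apply List.filter_congr
      intro p _
      rw [hb]
      simp [Int.natCast_inj]
    constructor
    · intro n
      rw [hfold]
      unfold part2B_sumstep
      simp only [← hb]
      rw [PySem.Dict.getD_insert]
      by_cases hn : n = b
      · subst hn
        rw [if_pos rfl, ihc b, List.filter_append]
        have hsing : ((lab, fv) :: []).filter (fun p => ((hashB p.1 : Nat) : Int) == b) = [(lab, fv)] := by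
          simp [hb, hh]
        rw [hsing]
        simp
      · rw [if_neg hn, ihc n, List.filter_append]
        have hsing : ((lab, fv) :: []).filter (fun p => ((hashB p.1 : Nat) : Int) == n) = [] := by
          have hcond : (((hashB lab : Nat) : Int) == n) = false := by
            simp only [beq_eq_false_iff_ne, ne_eq]
            intro he
            exact hn (by rw [← he, hb, hh])
          simp [hcond]
        rw [hsing]
        simp
    · rw [hfold]
      unfold part2B_sumstep
      simp only [← hb]
      have hcnt : r.2.getD b 0 = ((M.filter (fun p => hashB p.1 == h)).length : Int) := by
        rw [ihc b, hcnt_nat M]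
      rw [ihs, hcnt, hfe]
      apply Eq.symm
      apply sum_range_update (fun n => F M n) (fun n => F (M ++ [(lab, fv)]) n) 256 h
        ((b + 1) * (((M.filter (fun p => hashB p.1 == h)).length : Int) + 1) * fv)
        (hashB_lt lab)
      · intro n hn
        unfold F
        rw [List.filter_append]
        have hsing : ((lab, fv) :: []).filter (fun p => hashB p.1 == n) = [] := by
          have hcond : (hashB lab == n) = false := by
            simp only [beq_eq_false_iff_ne, ne_eq]
            intro he
            exact hn ((he ▸ hh).symm)
          simp [hcond]
        rw [hsing, List.append_nil]
      · unfold F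
        rw [List.filter_append]
        have hsing : ((lab, fv) :: []).filter (fun p => hashB p.1 == h) = [(lab, fv)] := by
          simp [hh]
        rw [hsing, PySem.List.enumerate_append, List.map_append, List.sum_append]
        simp only [PySem.List.enumerate_cons, PySem.List.enumerate_nil, List.map_cons,
          List.map_nil, List.sum_cons, List.sum_nil]
        rw [hb]
        push_cast
        ring

-- ===== VERDICT (by name: the statement is the Claim_ definition above) =====
set_option maxHeartbeats 1000000 in
theorem part2_spec : Claim_equal_part2 := by
  intro input _ _
  unfold Spec_part2 part2 part2_alt
  set seq := parse_input input with hseq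
  set L := seq.foldl flatT [] with hL
  -- A side
  obtain ⟨hnd, hbound, hpt⟩ := Afold seq PySem.Dict.empty [] Ainit
  set A := seq.foldl part2_step PySem.Dict.empty with hA
  -- B side
  obtain ⟨horder, hfoc, hndL⟩ :=
    Bside seq (part2B_pending seq) PySem.Dict.empty [] []
      (by simp) rfl (by simp) (by simp [PySem.Dict.contains_empty])
      (fun lab => pending_spec seq lab) (by simp)
  set stB := seq.foldl part2B_step (part2B_pending seq, [], PySem.Dict.empty) with hstB
  -- A's total = sum over its keys of boxContrib
  have hAsum : (A.items.map (fun p =>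
      ((PySem.List.enumerate p.2.values 1).map (fun q => (p.1 + 1) * q.1 * q.2)).sum)).sum
      = (A.keys.map (boxContrib A)).sum := by
    rw [PySem.Dict.items_eq_map_keys A hnd PySem.Dict.empty, List.map_map]
    congr 1
    apply List.map_congr_left
    intro k _
    simp only [Function.comp_def]
    rw [show (A.getD k PySem.Dict.empty).values
        = (A.getD k PySem.Dict.empty).items.map Prod.snd from rfl, enumerate_map, List.map_map]
    rfl
  -- = sum over the whole range
  have hrange : (A.keys.map (boxContrib A)).sum
      = (((List.range 256).map (fun n : Nat => ((n : Nat) : Int))).map (boxContrib A)).sum := by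
    apply sum_over_keys (boxContrib A) A.keys _ hnd
    · exact List.nodup_range.map (fun a b hcast => by exact_mod_cast hcast)
    · intro k hk
      obtain ⟨n, hn, rfl⟩ := hbound k hk
      exact List.mem_map.mpr ⟨n, List.mem_range.mpr hn, rfl⟩
    · intro bk hbk hbkk
      obtain ⟨n, hn, rfl⟩ := List.mem_map.mp hbk
      have hfind : List.find? (fun p => p.1 == ((n : Nat) : Int)) A.items = none := by
        rw [List.find?_eq_none]
        intro p hp
        simp only [beq_iff_eq]
        intro hpe
        exact hbkk (by
          rw [← hpe]
          simp only [PySem.Dict.keys, List.mem_map]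
          exact ⟨p, hp, rfl⟩)
      have hempty : A.getD ((n : Nat) : Int) PySem.Dict.empty = PySem.Dict.empty := by
        simp [PySem.Dict.getD, PySem.Dict.get?, hfind]
      simp only [boxContrib, hempty]
      rfl
  -- pointwise: boxContrib at n is F L n
  have hFL : ∀ n ∈ List.range 256, boxContrib A ((n : Nat) : Int) = F L n := by
    intro n hn
    have hitems := (hpt n (List.mem_range.mp hn)).2
    unfold boxContrib F
    rw [hitems]
  -- B's total
  obtain ⟨_, hBsum⟩ := Bsum_aux L stB.2.2 hfoc
  rw [hAsum, hrange, List.map_map]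
  have : ((List.range 256).map ((boxContrib A) ∘ (fun n : Nat => ((n : Nat) : Int)))).sum
      = ((List.range 256).map (fun n => F L n)).sum := by
    congr 1
    apply List.map_congr_left
    intro n hn
    exact hFL n hn
  rw [this, ← hBsum, ← horder]
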